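-- pv_equiv track=rewrite | github.com/ngquochuydl23/ASR-Record-Summarize | record-summarize-api/src/ai_modules/vie_asr_model/vie_asr_ai_model.py | _ctc_decode_with_timestamps
-- ===== SOURCE A (Python) =====
-- def _ctc_decode_with_timestamps(tokens, timestamps):
--     words = []
--     current_word = ""
--     start_time, end_time = None, None
--     for i, (tok, ts) in enumerate(zip(tokens, timestamps)):
--         if tok in ["<pad>", "<unk>", "<s>", "</s>"]:
--             continue
--         if tok == "|":
--             if current_word:
--                 words.append((start_time, end_time, current_word))
--                 current_word = ""
--                 start_time, end_time = None, None
--             continue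
--         if not current_word or tok != current_word[-1]:
--             if not current_word:
--                 start_time = ts
--             current_word += tok
--             end_time = ts
--     if current_word:
--         words.append((start_time, end_time, current_word))
--     return words
-- ===== SOURCE B (Python) =====
-- SPECIAL = frozenset(("<pad>", "<unk>", "<s>", "</s>"))
--
--
-- def _collapse(segment):
--     # Collapse one pipe-free segment: drop a token equal to the last character
--     # of the word built so far; keep the first kept token's ts as start and the
--     # last kept token's ts as end.
--     word = ""
--     start = end = None
--     for tok, ts in segment:
--         if not word:
--             start = ts
--         if not word or tok != word[-1]:
--             word += tok
--             end = ts
--     return (start, end, word) if word else None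
--
--
-- def _ctc_decode_with_timestamps(tokens, timestamps):
--     filtered = [(t, ts) for t, ts in zip(tokens, timestamps) if t not in SPECIAL]
--     segments = []
--     cur = []
--     for pair in filtered:
--         if pair[0] == "|":
--             segments.append(cur)
--             cur = []
--         else:
--             cur.append(pair)
--     segments.append(cur)
--     return [w for w in map(_collapse, segments) if w is not None]
-- ===== Notes on version B (the rewrite author's own statement) =====
-- stated objective: alternative
-- what changed: A is one monolithic loop interleaving special-token skipping, pipe handling and run-collapsing with a mutable word/start/end state; B first filters out special tokens, then splits the filtered (token, timestamp) pairs into pipe-delimited segments, and finally collapses each segment independently with a small helper, dropping empty segments.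
import Mathlib
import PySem

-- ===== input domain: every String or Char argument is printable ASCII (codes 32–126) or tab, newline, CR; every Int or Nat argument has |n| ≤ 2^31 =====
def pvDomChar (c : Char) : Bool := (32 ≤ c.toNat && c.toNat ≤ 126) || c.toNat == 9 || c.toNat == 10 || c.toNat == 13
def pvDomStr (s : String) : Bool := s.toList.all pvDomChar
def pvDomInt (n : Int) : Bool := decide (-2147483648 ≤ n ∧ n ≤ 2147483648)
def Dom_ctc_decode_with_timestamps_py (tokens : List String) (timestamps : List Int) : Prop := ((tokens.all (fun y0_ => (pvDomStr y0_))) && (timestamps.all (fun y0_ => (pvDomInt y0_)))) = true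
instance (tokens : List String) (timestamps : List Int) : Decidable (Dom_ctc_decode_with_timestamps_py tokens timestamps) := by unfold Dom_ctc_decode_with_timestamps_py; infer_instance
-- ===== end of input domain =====

-- B restructures A's single stateful loop as filter-specials → split-on-pipe → collapse each
-- segment (alternative decomposition, same cost). Equivalence is proved for all inputs.

-- ===== PORT A =====
-- current_word is carried as List Char (Python str state); start/end as Option Int (None).
-- `words.append(...)` happens only with a non-empty word, where A has set both times; the
-- `.getD 0` on the Option is therefore never the None case.
def pvA_loop : List (String × Int) → List (Int × Int × String) → List Char → Option Int → Option Int → List (Int × Int × String)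
  | [], words, cw, st, en =>
      if cw ≠ [] then words ++ [(st.getD 0, en.getD 0, String.ofList cw)] else words
  | (tok, ts) :: rest, words, cw, st, en =>
      if tok ∈ ["<pad>", "<unk>", "<s>", "</s>"] then
        pvA_loop rest words cw st en
      else if tok = "|" then
        if cw ≠ [] then pvA_loop rest (words ++ [(st.getD 0, en.getD 0, String.ofList cw)]) [] none none
        else pvA_loop rest words cw st en
      else
        -- `not current_word or tok != current_word[-1]` (word[-1] is a 1-char string in Python)
        if (cw.isEmpty || (match PySem.List.pyGet? cw (-1) with
                           | none => true
                           | some c => tok != String.ofList [c])) then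
          pvA_loop rest words (cw ++ tok.toList) (if cw = [] then some ts else st) (some ts)
        else
          pvA_loop rest words cw st en

-- the enumerate index i of A's loop is unused; the loop runs over zip(tokens, timestamps)
def ctc_decode_with_timestamps_py (tokens : List String) (timestamps : List Int) : List (Int × Int × String) :=
  pvA_loop (tokens.zip timestamps) [] [] none none

-- ===== PORT B =====
def pvSpecials : List String := ["<pad>", "<unk>", "<s>", "</s>"]

-- one iteration of _collapse's loop, state = (word as List Char, start, end)
def pvCollapseStep (s : List Char × Option Int × Option Int) (p : String × Int) : List Char × Option Int × Option Int :=
  let st' := if s.1 = [] then some p.2 else s.2.1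
  if (s.1.isEmpty || (match PySem.List.pyGet? s.1 (-1) with
                      | none => true
                      | some c => p.1 != String.ofList [c])) then
    (s.1 ++ p.1.toList, st', some p.2)
  else
    (s.1, st', s.2.2)

-- _collapse: fold the loop, then `(start, end, word) if word else None`
def pvCollapse (seg : List (String × Int)) : Option (Int × Int × String) :=
  let s := seg.foldl pvCollapseStep ([], none, none)
  if s.1 ≠ [] then some (s.2.1.getD 0, s.2.2.getD 0, String.ofList s.1) else none

-- the segment-splitting loop of B (cur is the segment being accumulated)
def pvSplitSegs (cur : List (String × Int)) : List (String × Int) → List (List (String × Int))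
  | [] => [cur]
  | p :: rest => if p.1 = "|" then cur :: pvSplitSegs [] rest else pvSplitSegs (cur ++ [p]) rest

def ctc_decode_with_timestamps_py_alt (tokens : List String) (timestamps : List Int) : List (Int × Int × String) :=
  let filtered := (tokens.zip timestamps).filter (fun p => !(pvSpecials.contains p.1))
  ((pvSplitSegs [] filtered).map pvCollapse).filterMap id

-- ===== PRECONDITION & SPEC =====
def Spec_ctc_decode_with_timestamps_py (tokens : List String) (timestamps : List Int) (out : List (Int × Int × String)) : Prop := out = ctc_decode_with_timestamps_py_alt tokens timestamps
instance (tokens : List String) (timestamps : List Int) (out : List (Int × Int × String)) : Decidable (Spec_ctc_decode_with_timestamps_py tokens timestamps out) := by unfold Spec_ctc_decode_with_timestamps_py; infer_instance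

-- ===== CLAIM (what is proved, stated in full; the proofs are below) =====
def Claim_equal_ctc_decode_with_timestamps_py : Prop := ∀ (tokens : List String) (timestamps : List Int), Dom_ctc_decode_with_timestamps_py tokens timestamps → Spec_ctc_decode_with_timestamps_py tokens timestamps (ctc_decode_with_timestamps_py tokens timestamps)

-- ===== LEMMAS AND PROOFS =====

-- the word/times state both loops carry
def pvFinish (s : List Char × Option Int × Option Int) : List (Int × Int × String) :=
  if s.1 ≠ [] then [(s.2.1.getD 0, s.2.2.getD 0, String.ofList s.1)] else []

-- common recursive description of "what remains to be emitted" from state s on input l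
def pvG : List (String × Int) → (List Char × Option Int × Option Int) → List (Int × Int × String)
  | [], s => pvFinish s
  | p :: rest, s =>
      if p.1 ∈ pvSpecials then pvG rest s
      else if p.1 = "|" then pvFinish s ++ pvG rest ([], none, none)
      else pvG rest (pvCollapseStep s p)

lemma pvStep_empty (p : String × Int) (st en : Option Int) :
    pvCollapseStep ([], st, en) p = (p.1.toList, some p.2, some p.2) := by
  simp [pvCollapseStep]

-- with an empty word the pending start/end times are never consulted
lemma pvG_empty : ∀ (l : List (String × Int)) (st en st' en' : Option Int),
    pvG l ([], st, en) = pvG l ([], st', en') := by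
  intro l
  induction l with
  | nil => intro st en st' en'; rfl
  | cons p rest ih =>
      intro st en st' en'
      by_cases hs : p.1 ∈ pvSpecials
      · simp only [pvG, if_pos hs]; exact ih _ _ _ _
      · by_cases hp : p.1 = "|"
        · have hps : ("|" : String) ∉ pvSpecials := by decide
          simp [pvG, hp, hps, pvFinish]
        · simp only [pvG, if_neg hs, if_neg hp, pvStep_empty]

-- A's loop, from any state, emits `words` then pvG of the rest
lemma pvA_eq_G : ∀ (l : List (String × Int)) (words : List (Int × Int × String))
    (cw : List Char) (st en : Option Int),
    pvA_loop l words cw st en = words ++ pvG l (cw, st, en) := by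
  intro l
  induction l with
  | nil =>
      intro words cw st en
      by_cases h : cw = [] <;> simp [pvA_loop, pvG, pvFinish, h]
  | cons p rest ih =>
      intro words cw st en
      obtain ⟨tok, ts⟩ := p
      by_cases hs : tok ∈ pvSpecials
      · have hA : tok ∈ ["<pad>", "<unk>", "<s>", "</s>"] := by simpa [pvSpecials] using hs
        simp [pvA_loop, pvG, hA, hs, ih]
      · have hA : tok ∉ ["<pad>", "<unk>", "<s>", "</s>"] := by simpa [pvSpecials] using hs
        by_cases hp : tok = "|"
        · by_cases hw : cw = []
          · subst hw
            calc pvA_loop ((tok, ts) :: rest) words [] st en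
                = pvA_loop rest words [] st en := by simp [pvA_loop, hp]
              _ = words ++ pvG rest ([], st, en) := ih _ _ _ _
              _ = words ++ pvG rest ([], none, none) := by rw [pvG_empty]
              _ = words ++ pvG ((tok, ts) :: rest) ([], st, en) := by
                    have hps : ("|" : String) ∉ pvSpecials := by decide
                    simp [pvG, hp, hps, pvFinish]
          · have hps : ("|" : String) ∉ pvSpecials := by decide
            simp [pvA_loop, pvG, hp, hps, hw, pvFinish, ih]
        · by_cases hc : (cw.isEmpty || (match PySem.List.pyGet? cw (-1) with
                           | none => true
                           | some c => tok != String.ofList [c])) = true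
          · have hstep : pvCollapseStep (cw, st, en) (tok, ts)
                = (cw ++ tok.toList, (if cw = [] then some ts else st), some ts) := by
              simp [pvCollapseStep, hc]
            simp [pvA_loop, pvG, hA, hs, hp, hc, ih, hstep]
          · have hw : cw ≠ [] := by
              intro h; subst h; simp at hc
            have hstep : pvCollapseStep (cw, st, en) (tok, ts) = (cw, st, en) := by
              simp [pvCollapseStep, hc, hw]
            simp [pvA_loop, pvG, hA, hs, hp, hc, ih, hstep]

-- B's pipeline, with segment-in-progress cur, equals pvG of the unfiltered rest
lemma pvB_eq_G : ∀ (l cur : List (String × Int)),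
    ((pvSplitSegs cur (l.filter (fun p => !(pvSpecials.contains p.1)))).map pvCollapse).filterMap id
      = pvG l (cur.foldl pvCollapseStep ([], none, none)) := by
  intro l
  induction l with
  | nil =>
      intro cur
      simp only [List.filter_nil, pvSplitSegs, List.map, List.filterMap, pvG]
      simp [pvCollapse, pvFinish]
      by_cases h : (cur.foldl pvCollapseStep ([], none, none)).1 = [] <;> simp [h]
  | cons p rest ih =>
      intro cur
      by_cases hs : p.1 ∈ pvSpecials
      · have hc : (!(pvSpecials.contains p.1)) = false := by simp [hs]
        rw [List.filter_cons_of_neg (p := fun q : String × Int => !(pvSpecials.contains q.1))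
              (a := p) (by simp [hs])]
        simp only [pvG, if_pos hs]
        exact ih cur
      · have hc : (!(pvSpecials.contains p.1)) = true := by simpa using hs
        rw [List.filter_cons_of_pos (p := fun q : String × Int => !(pvSpecials.contains q.1))
              (a := p) hc]
        by_cases hp : p.1 = "|"
        · simp only [pvSplitSegs, if_pos hp, List.map, List.filterMap_cons]
          have hps : ("|" : String) ∉ pvSpecials := by decide
          have hG : pvG (p :: rest) (cur.foldl pvCollapseStep ([], none, none))
              = pvFinish (cur.foldl pvCollapseStep ([], none, none)) ++ pvG rest ([], none, none) := by
            simp [pvG, hp, hps]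
          have hB := ih []
          simp only [List.foldl_nil] at hB
          rw [hG, ← hB]
          rcases hcc : pvCollapse cur with _ | w
          · have hf : pvFinish (cur.foldl pvCollapseStep ([], none, none)) = [] := by
              simp [pvCollapse] at hcc
              simp [pvFinish, hcc]
            simp [hf]
          · have hf : pvFinish (cur.foldl pvCollapseStep ([], none, none)) = [w] := by
              simp only [pvCollapse] at hcc
              by_cases h : (cur.foldl pvCollapseStep ([], none, none)).1 = []
              · simp [h] at hcc
              · simp [h] at hcc
                simp [pvFinish, h, hcc]
            simp [hf]
        · simp only [pvSplitSegs, if_neg hp]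
          rw [ih (cur ++ [p])]
          simp only [pvG, if_neg hs, if_neg hp, List.foldl_append, List.foldl_cons, List.foldl_nil]

-- ===== VERDICT (by name: the statement is the Claim_ definition above) =====
theorem ctc_decode_with_timestamps_py_spec : Claim_equal_ctc_decode_with_timestamps_py := by
  intro tokens timestamps _
  unfold Spec_ctc_decode_with_timestamps_py ctc_decode_with_timestamps_py ctc_decode_with_timestamps_py_alt
  rw [pvA_eq_G, pvB_eq_G]
  simp
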